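-- pv_equiv track=rewrite | github.com/pacyu/Jiroapp | E2C&C2E.py | is_English
-- ===== SOURCE A (Python) =====
-- def is_English(word):
--     flag = False
--     for ch in word:
--         if 'A' <= ch <= 'z':
--             flag = True
--         else:
--             flag = False
--             break
--
--     return flag
-- ===== SOURCE B (Python) =====
-- def is_English(word):
--     return bool(word) and 'A' <= min(word) and max(word) <= 'z'
-- ===== Notes on version B (the rewrite author's own statement) =====
-- stated objective: alternative
-- what changed: Replaces the per-character flag/break scan with an aggregate bound check: nonempty and the minimum and maximum characters lie within the accepted range.
import Mathlib
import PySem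

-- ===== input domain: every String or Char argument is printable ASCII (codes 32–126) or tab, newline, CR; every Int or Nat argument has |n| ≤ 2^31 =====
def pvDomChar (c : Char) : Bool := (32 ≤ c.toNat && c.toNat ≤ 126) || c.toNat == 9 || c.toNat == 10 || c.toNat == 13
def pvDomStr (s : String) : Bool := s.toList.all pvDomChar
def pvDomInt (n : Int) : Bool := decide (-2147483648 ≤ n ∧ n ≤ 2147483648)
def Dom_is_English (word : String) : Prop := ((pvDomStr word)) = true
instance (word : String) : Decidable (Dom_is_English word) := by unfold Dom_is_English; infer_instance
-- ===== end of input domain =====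

-- B replaces A's per-character flag/break scan with an aggregate bound check (nonempty ∧ 'A' ≤ min ∧ max ≤ 'z'); objective: alternative.


-- ===== PORT A =====
-- the for-loop with its flag variable and early break, as structural recursion over the chars
def isEnglishLoop : List Char → Bool → Bool
  | [], flag => flag
  | ch :: rest, _ =>
      if 'A' ≤ ch ∧ ch ≤ 'z' then isEnglishLoop rest true
      else false

def is_English (word : String) : Bool := isEnglishLoop word.toList false

-- ===== PORT B =====
-- bool(word) and 'A' <= min(word) and max(word) <= 'z'
def is_English_alt (word : String) : Bool :=
  match word.toList with
  | [] => false
  | c :: cs => decide ('A' ≤ cs.foldl min c ∧ cs.foldl max c ≤ 'z')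

-- ===== PRECONDITION & SPEC =====
def Spec_is_English (word : String) (out : Bool) : Prop := out = is_English_alt word
instance (word : String) (out : Bool) : Decidable (Spec_is_English word out) := by unfold Spec_is_English; infer_instance

-- ===== CLAIM (what is proved, stated in full; the proofs are below) =====
def Claim_equal_is_English : Prop := ∀ (word : String), Dom_is_English word → Spec_is_English word (is_English word)

-- ===== LEMMAS AND PROOFS =====

theorem loop_true_eq_all (l : List Char) :
    isEnglishLoop l true = l.all (fun ch => decide ('A' ≤ ch ∧ ch ≤ 'z')) := by
  induction l with
  | nil => rfl
  | cons c cs ih =>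
    simp only [isEnglishLoop, List.all_cons]
    by_cases h : 'A' ≤ c ∧ c ≤ 'z' <;> simp [h, ih]

theorem foldl_min_ge (cs : List Char) (c : Char) :
    ('A' ≤ cs.foldl min c) ↔ ('A' ≤ c ∧ ∀ x ∈ cs, 'A' ≤ x) := by
  induction cs generalizing c with
  | nil => simp
  | cons x xs ih =>
    simp only [List.foldl_cons, ih, le_min_iff, List.mem_cons]
    constructor
    · rintro ⟨⟨h1, h2⟩, h3⟩
      exact ⟨h1, fun y hy => hy.elim (fun e => e ▸ h2) (h3 y)⟩
    · rintro ⟨h1, h2⟩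
      exact ⟨⟨h1, h2 x (Or.inl rfl)⟩, fun y hy => h2 y (Or.inr hy)⟩

theorem foldl_max_le (cs : List Char) (c : Char) :
    (cs.foldl max c ≤ 'z') ↔ (c ≤ 'z' ∧ ∀ x ∈ cs, x ≤ 'z') := by
  induction cs generalizing c with
  | nil => simp
  | cons x xs ih =>
    simp only [List.foldl_cons, ih, max_le_iff, List.mem_cons]
    constructor
    · rintro ⟨⟨h1, h2⟩, h3⟩
      exact ⟨h1, fun y hy => hy.elim (fun e => e ▸ h2) (h3 y)⟩
    · rintro ⟨h1, h2⟩
      exact ⟨⟨h1, h2 x (Or.inl rfl)⟩, fun y hy => h2 y (Or.inr hy)⟩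

-- ===== VERDICT (by name: the statement is the Claim_ definition above) =====
theorem is_English_spec : Claim_equal_is_English := by
  intro word _
  unfold Spec_is_English is_English is_English_alt
  cases h : word.toList with
  | nil => rfl
  | cons c cs =>
    simp only [isEnglishLoop]
    by_cases hc : 'A' ≤ c ∧ c ≤ 'z'
    · rw [if_pos hc, loop_true_eq_all, Bool.eq_iff_iff]
      simp only [List.all_eq_true, decide_eq_true_eq, foldl_min_ge, foldl_max_le, hc.1, hc.2,
        true_and]
      constructor
      · intro h; exact ⟨fun x hx => (h x hx).1, fun x hx => (h x hx).2⟩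
      · rintro ⟨h1, h2⟩ x hx; exact ⟨h1 x hx, h2 x hx⟩
    · rw [if_neg hc]
      rw [eq_comm, decide_eq_false_iff_not]
      rintro ⟨h1, h2⟩
      exact hc ⟨(foldl_min_ge cs c).mp h1 |>.1, (foldl_max_le cs c).mp h2 |>.1⟩
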